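-- pv_equiv track=rewrite | github.com/whehdwns/Simple_Search_Engine | bible_search_engine.py | dictionary_list
-- ===== SOURCE A (Python) =====
-- from collections import Counter, defaultdict, OrderedDict
--
-- def dictionary_list(listed):
--     sort_dict = {}
--     result_sort_dict = {}
--     offset_sum = 0
--     offset_i = 0
--     sort_dict = OrderedDict(sorted(listed.items()))
--     for i, value in enumerate(sort_dict.keys()):
--         offset_i = len(sort_dict[value]) * 2
--         result_sort_dict[value] = len(sort_dict[value].values()),offset_sum
--         offset_sum = offset_sum + offset_i
--     return result_sort_dict
-- ===== SOURCE B (Python) =====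
-- def dictionary_list(listed):
--     # offset of key k computed independently: total weight of strictly smaller keys
--     # (no running accumulator; correct because dict keys are unique)
--     return {k: (len(v.values()),
--                 sum(2 * len(w) for j, w in listed.items() if j < k))
--             for k, v in sorted(listed.items())}
-- ===== Notes on version B (the rewrite author's own statement) =====
-- stated objective: alternative
-- what changed: A threads a running offset accumulator through a sorted loop; B computes each key's offset independently as the sum of 2*len(w) over all entries with a strictly smaller key, so no accumulator or offset state exists at all (a stateless quadratic formulation).
import Mathlib
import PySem

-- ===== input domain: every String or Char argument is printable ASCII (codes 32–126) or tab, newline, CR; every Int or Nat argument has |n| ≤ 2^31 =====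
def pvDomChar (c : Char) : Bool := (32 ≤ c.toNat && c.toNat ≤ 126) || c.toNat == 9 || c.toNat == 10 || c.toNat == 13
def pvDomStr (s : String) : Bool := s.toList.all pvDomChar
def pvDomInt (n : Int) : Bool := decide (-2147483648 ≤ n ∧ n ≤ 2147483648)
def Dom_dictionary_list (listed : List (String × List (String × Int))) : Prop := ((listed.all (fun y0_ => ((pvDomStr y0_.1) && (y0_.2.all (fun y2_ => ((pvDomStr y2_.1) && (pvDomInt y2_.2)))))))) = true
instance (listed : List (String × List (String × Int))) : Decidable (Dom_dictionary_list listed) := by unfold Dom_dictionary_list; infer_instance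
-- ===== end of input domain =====

-- B drops A's running offset accumulator entirely: each key's offset is computed
-- independently as the sum of 2*len(w) over entries with a strictly smaller key; objective: alternative.

-- ===== PORT A =====
def dictionary_list (listed : List (String × List (String × Int))) : List (String × Int × Int) :=
  let sort_dict : PySem.Dict String (List (String × Int)) :=
    PySem.Dict.ofList (PySem.List.sorted listed (fun p => p.1) false)
  let st := (PySem.Dict.keys sort_dict).foldl
    (fun (st : PySem.Dict String (Int × Int) × Int) value =>
      let offset_i := PySem.List.len (sort_dict.getD value []) * 2
      (st.1.insert value (PySem.List.len (sort_dict.getD value []), st.2), st.2 + offset_i))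
    (PySem.Dict.empty, 0)
  st.1.items

-- ===== PORT B =====
def dictionary_list_alt (listed : List (String × List (String × Int))) : List (String × Int × Int) :=
  (PySem.Dict.ofList ((PySem.List.sorted listed (fun p => p.1) false).map
    (fun p => (p.1, (PySem.List.len p.2,
      ((listed.filter (fun q => q.1 < p.1)).map (fun q => 2 * PySem.List.len q.2)).sum))))).items

-- ===== PRECONDITION & SPEC =====
-- Pre_ excludes association lists with duplicate keys (outer or inner): those do not
-- represent any Python dict (a dict's keys are unique), so A's behaviour on them is
-- fixed only after the duplicates have collapsed.
def Pre_dictionary_list (listed : List (String × List (String × Int))) : Prop :=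
  (listed.map Prod.fst).Nodup ∧ ∀ p ∈ listed, (p.2.map Prod.fst).Nodup
instance (listed : List (String × List (String × Int))) : Decidable (Pre_dictionary_list listed) := by unfold Pre_dictionary_list; infer_instance

def pvWitness_dictionary_list : (List (String × List (String × Int))) :=
  [("b", [("x", 1), ("y", 2)]), ("a", [("z", 3)]), ("c", [])]

def Spec_dictionary_list (listed : List (String × List (String × Int))) (out : List (String × Int × Int)) : Prop := out = dictionary_list_alt listed
instance (listed : List (String × List (String × Int))) (out : List (String × Int × Int)) : Decidable (Spec_dictionary_list listed out) := by unfold Spec_dictionary_list; infer_instance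

-- ===== CLAIM (what is proved, stated in full; the proofs are below) =====
def Claim_equal_dictionary_list : Prop := ∀ (listed : List (String × List (String × Int))), Dom_dictionary_list listed → Pre_dictionary_list listed → Spec_dictionary_list listed (dictionary_list listed)

-- ===== LEMMAS AND PROOFS =====

-- the common value of both programs on a sorted item list, starting at a given offset
def pvCore : List (String × List (String × Int)) → Int → List (String × Int × Int)
  | [], _ => []
  | (k, v) :: t, off => (k, ((v.length : Int), off)) :: pvCore t (off + 2 * (v.length : Int))

-- B's per-key weight of the strictly-smaller entries of a list
def pvSum (t : List (String × List (String × Int))) (k : String) : Int :=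
  ((t.filter (fun q => q.1 < k)).map (fun q => 2 * (q.2.length : Int))).sum

theorem pvCore_map_fst (s : List (String × List (String × Int))) (off : Int) :
    (pvCore s off).map Prod.fst = s.map Prod.fst := by
  induction s generalizing off with
  | nil => rfl
  | cons p t ih => cases p; simp [pvCore, ih]

theorem items_ofList_nodup {ν : Type} (l : List (String × ν)) (h : (l.map Prod.fst).Nodup) :
    (PySem.Dict.ofList l).items = l := by
  have := PySem.Dict.items_foldl_insert_fresh l Prod.fst Prod.snd PySem.Dict.empty
    (by intro a _; simp [PySem.Dict.contains_empty]) h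
  simpa [PySem.Dict.ofList, PySem.Dict.update] using this

-- A's loop over fresh distinct keys, with the offset threaded through the state
theorem pvA_fold (s : List (String × List (String × Int)))
    (d : PySem.Dict String (Int × Int)) (off : Int)
    (hfresh : ∀ p ∈ s, d.contains p.1 = false) (hnd : (s.map Prod.fst).Nodup) :
    (s.foldl (fun (st : PySem.Dict String (Int × Int) × Int) p =>
        (st.1.insert p.1 ((p.2.length : Int), st.2), st.2 + (p.2.length : Int) * 2)) (d, off)).1.items
      = d.items ++ pvCore s off := by
  induction s generalizing d off with
  | nil => simp [pvCore]
  | cons p t ih =>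
    obtain ⟨k, v⟩ := p
    simp only [List.map_cons, List.nodup_cons] at hnd
    have hdk : d.contains k = false := hfresh (k, v) (List.mem_cons_self)
    rw [List.foldl_cons]
    have hfresh' : ∀ q ∈ t, (d.insert k ((v.length : Int), off)).contains q.1 = false := by
      intro q hq
      rw [PySem.Dict.contains_insert]
      have : q.1 ≠ k := by
        intro he; exact hnd.1 (he ▸ List.mem_map_of_mem hq)
      simp [this, hfresh q (List.mem_cons_of_mem _ hq)]
    rw [ih _ _ hfresh' hnd.2, PySem.Dict.items_insert_of_not_contains _ _ hdk]
    have : off + (v.length : Int) * 2 = off + 2 * (v.length : Int) := by ring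
    simp [pvCore, this]

-- B's per-key sums over a strictly key-increasing list produce exactly pvCore's offsets
theorem pvB_core (s : List (String × List (String × Int))) (off : Int)
    (hlt : s.Pairwise (fun a b => a.1 < b.1)) :
    s.map (fun p => (p.1, ((p.2.length : Int), off + pvSum s p.1))) = pvCore s off := by
  induction s generalizing off with
  | nil => rfl
  | cons p t ih =>
    obtain ⟨k, v⟩ := p
    rw [List.pairwise_cons] at hlt
    have hhead : pvSum ((k, v) :: t) k = 0 := by
      unfold pvSum
      have : List.filter (fun q => decide (q.1 < k)) ((k, v) :: t) = [] := by
        rw [List.filter_eq_nil_iff]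
        intro q hq
        rcases List.mem_cons.mp hq with h | h
        · subst h; simp
        · have hq1 : ¬ q.1 < k := not_lt.mpr (le_of_lt (hlt.1 q h))
          simpa using hq1
      rw [this]; rfl
    have htail : ∀ q ∈ t, pvSum ((k, v) :: t) q.1 = 2 * (v.length : Int) + pvSum t q.1 := by
      intro q hq
      unfold pvSum
      have hk : k < q.1 := hlt.1 q hq
      have hk' : decide (k < q.1) = true := decide_eq_true hk
      rw [List.filter_cons, hk']
      simp
    rw [List.map_cons, hhead]
    have : t.map (fun p => (p.1, ((p.2.length : Int), off + pvSum ((k, v) :: t) p.1)))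
        = t.map (fun p => (p.1, ((p.2.length : Int), (off + 2 * (v.length : Int)) + pvSum t p.1))) := by
      apply List.map_congr_left
      intro q hq
      rw [htail q hq]; ring_nf
    rw [this, ih (off + 2 * (v.length : Int)) hlt.2]
    simp [pvCore]

theorem sorted_fst_nodup (listed : List (String × List (String × Int)))
    (h : (listed.map Prod.fst).Nodup) :
    ((PySem.List.sorted listed (fun p => p.1) false).map Prod.fst).Nodup :=
  (h.perm ((PySem.List.sorted_perm listed (fun p => p.1) false).map Prod.fst).symm)

-- ===== VERDICT (by name: the statement is the Claim_ definition above) =====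
theorem dictionary_list_spec : Claim_equal_dictionary_list := by
  intro listed _hdom hpre
  unfold Spec_dictionary_list dictionary_list dictionary_list_alt
  dsimp only
  set s := PySem.List.sorted listed (fun p => p.1) false with hs
  have hperm : s.Perm listed := PySem.List.sorted_perm listed (fun p => p.1) false
  have hnd : (s.map Prod.fst).Nodup := sorted_fst_nodup listed hpre.1
  have hitems : (PySem.Dict.ofList s).items = s := items_ofList_nodup s hnd
  -- A side
  have hkeys : (PySem.Dict.ofList s).keys = s.map Prod.fst := by
    simp [PySem.Dict.keys, hitems]
  have hlook : ∀ p ∈ s, (PySem.Dict.ofList s).getD p.1 [] = p.2 := by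
    intro p hp
    refine PySem.Dict.getD_of_mem_items _ ?_ ?_ []
    · rw [hitems]; exact hp
    · rw [hkeys]; exact hnd
  rw [hkeys, List.foldl_map]
  rw [PySem.List.foldl_congr_mem s _
      (fun (st : PySem.Dict String (Int × Int) × Int) p =>
        (st.1.insert p.1 ((p.2.length : Int), st.2), st.2 + (p.2.length : Int) * 2))
      (PySem.Dict.empty, 0)
      (by intro acc p hp; simp [hlook p hp, PySem.List.len_eq])]
  rw [pvA_fold s PySem.Dict.empty 0 (by intro p _; simp [PySem.Dict.contains_empty]) hnd]
  -- B side: replace the sums over `listed` by sums over its rearrangement s,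
  -- then evaluate the per-key sums along the strictly increasing s
  have hle : s.Pairwise (fun a b => a.1 ≤ b.1) :=
    PySem.List.sorted_pairwise listed (fun p => p.1)
  have hne : s.Pairwise (fun a b => a.1 ≠ b.1) := by
    have := (List.nodup_iff_pairwise_ne.mp hnd)
    exact (List.pairwise_map.mp this)
  have hlt : s.Pairwise (fun a b => a.1 < b.1) :=
    (hle.and hne).imp (fun h => lt_of_le_of_ne h.1 h.2)
  have hmap : s.map (fun p => (p.1, (PySem.List.len p.2,
        ((listed.filter (fun q => q.1 < p.1)).map (fun q => 2 * PySem.List.len q.2)).sum)))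
      = pvCore s 0 := by
    have hswap : ∀ p ∈ s,
        ((listed.filter (fun q => q.1 < p.1)).map (fun q => 2 * PySem.List.len q.2)).sum
          = pvSum s p.1 := by
      intro p _
      unfold pvSum
      exact List.Perm.sum_eq ((hperm.symm.filter _).map _)
    rw [List.map_congr_left (fun p hp => by
      rw [hswap p hp])]
    have := pvB_core s 0 hlt
    simpa using this
  rw [hmap, items_ofList_nodup _ (by rw [pvCore_map_fst]; exact hnd)]
  simp [PySem.Dict.empty]
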